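-- pv_equiv track=rewrite | github.com/SheepCoding/4-Gewinnt | function4Gewinnt.py | nebeneinanderReihe
-- ===== SOURCE A (Python) =====
-- def nebeneinanderReihe(reihe: list, farbe: str, anzahl: int) -> int:
--     """
--     Zweck:
--         Prüfen, ob eine bestimmte Anzahl an Steinen nebeneinander in der Reihe sind
--     Parameter:
--         reihe: eine Zeile oder Spalte als Liste
--         farbe: Farbe der Steine
--         anzahl: gewünschte Anzahl der Steine, die nebeneinander sind
--     Rückgabe:
--         Spalte, in der der letzte Stein der zusammenhängenden Steine liegt
--         -1 wenn nichts gefunden wurde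
--     """
--     zaehler = 0  # Zähler der Steine nebeneinander
--     i = 0
--     laenge = len(reihe)
--     while i < laenge and zaehler < anzahl:
--         # wenn richtige Farbe gefunden, Zähler erhöhen
--         if reihe[i] == farbe:
--             zaehler = zaehler + 1
--         # wenn falsche Farbe, Zähler zurück setzen
--         else:
--             zaehler = 0
--         i = i + 1
--     if zaehler >= anzahl:
--         # Stelle, in der der letzte Stein der zusammenhängenden Steine liegt
--         # i geht eine Stelle weiter, bevor die while-Schleife abbricht
--         return i - 1
--     else:
--         return -1
-- ===== SOURCE B (Python) =====
-- def nebeneinanderReihe(reihe: list, farbe: str, anzahl: int) -> int: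
--     """Prefix sums of farbe-matches: the window of length anzahl starting at i
--     is fully farbe iff its match count pref[i+anzahl]-pref[i] equals anzahl;
--     return the last index of the first such window, else -1."""
--     if anzahl <= 0:
--         return -1
--     pref = [0]
--     for x in reihe:
--         pref.append(pref[-1] + (x == farbe))
--     for i in range(len(reihe) - anzahl + 1):
--         if pref[i + anzahl] - pref[i] == anzahl:
--             return i + anzahl - 1
--     return -1
-- ===== Notes on version B (the rewrite author's own statement) =====
-- stated objective: alternative
-- what changed: Replaces A's single pass with a resetting consecutive counter by a prefix-sum table of farbe-matches plus a scan over window start positions, returning i+anzahl-1 at the first window whose match count equals anzahl.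
import Mathlib
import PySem

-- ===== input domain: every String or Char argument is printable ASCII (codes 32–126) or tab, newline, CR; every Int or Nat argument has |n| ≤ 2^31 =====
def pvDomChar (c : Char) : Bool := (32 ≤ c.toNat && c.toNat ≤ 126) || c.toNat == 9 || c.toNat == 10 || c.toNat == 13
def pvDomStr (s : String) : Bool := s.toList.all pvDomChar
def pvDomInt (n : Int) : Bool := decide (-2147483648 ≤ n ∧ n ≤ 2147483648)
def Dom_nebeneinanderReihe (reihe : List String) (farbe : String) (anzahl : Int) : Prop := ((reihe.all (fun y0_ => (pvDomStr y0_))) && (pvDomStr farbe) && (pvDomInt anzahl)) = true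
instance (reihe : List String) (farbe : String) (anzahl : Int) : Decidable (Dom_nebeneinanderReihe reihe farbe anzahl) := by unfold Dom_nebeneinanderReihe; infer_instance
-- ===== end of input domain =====

-- B replaces A's resetting-counter pass by a prefix-sum table of farbe-matches
-- plus a scan over window start positions (alternative algorithm, same O(n) cost).

-- ===== PORT A =====
-- the while loop: fuel counts the remaining iterations (≤ len reihe, so fuel = len reihe
-- suffices); the index i is always in range when read, so pyGetD's default is unreachable
def nebLoop (reihe : List String) (farbe : String) (anzahl : Int) :
    Nat → Int → Int → Int × Int
  | 0, i, zaehler => (i, zaehler)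
  | fuel + 1, i, zaehler =>
    if i < (reihe.length : Int) ∧ zaehler < anzahl then
      nebLoop reihe farbe anzahl fuel (i + 1)
        (if PySem.List.pyGetD reihe i "" == farbe then zaehler + 1 else 0)
    else (i, zaehler)

def nebeneinanderReihe (reihe : List String) (farbe : String) (anzahl : Int) : Int :=
  let p := nebLoop reihe farbe anzahl reihe.length 0 0
  if anzahl ≤ p.2 then p.1 - 1 else -1

-- ===== PORT B =====
-- pref is built by appending pref[-1] + (x == farbe); bools count as 1/0 in Python sums
def prefFold (farbe : String) (reihe : List String) : List Int :=
  reihe.foldl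
    (fun pref x => pref ++ [PySem.List.pyGetD pref (-1) 0 + (if x == farbe then 1 else 0)])
    [0]

-- the start-position scan; indices i and i + anzahl into pref are always in range,
-- so pyGetD's default is unreachable
def altFind (pref : List Int) (anzahl : Int) : List Int → Int
  | [] => -1
  | i :: rest =>
    if PySem.List.pyGetD pref (i + anzahl) 0 - PySem.List.pyGetD pref i 0 == anzahl then
      i + anzahl - 1
    else altFind pref anzahl rest

def nebeneinanderReihe_alt (reihe : List String) (farbe : String) (anzahl : Int) : Int :=
  if anzahl ≤ 0 then -1
  else
    altFind (prefFold farbe reihe) anzahl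
      (PySem.List.pyRange 0 ((reihe.length : Int) - anzahl + 1) 1)

-- ===== PRECONDITION & SPEC =====
def Spec_nebeneinanderReihe (reihe : List String) (farbe : String) (anzahl : Int) (out : Int) : Prop := out = nebeneinanderReihe_alt reihe farbe anzahl
instance (reihe : List String) (farbe : String) (anzahl : Int) (out : Int) : Decidable (Spec_nebeneinanderReihe reihe farbe anzahl out) := by unfold Spec_nebeneinanderReihe; infer_instance

-- ===== CLAIM (what is proved, stated in full; the proofs are below) =====
def Claim_equal_nebeneinanderReihe : Prop := ∀ (reihe : List String) (farbe : String) (anzahl : Int), Dom_nebeneinanderReihe reihe farbe anzahl → Spec_nebeneinanderReihe reihe farbe anzahl (nebeneinanderReihe reihe farbe anzahl)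

-- ===== LEMMAS AND PROOFS =====

-- `win s`: the window of length k starting at s lies inside reihe and is all farbe
def win (reihe : List String) (farbe : String) (k : Nat) (s : Nat) : Bool :=
  decide (∀ j, j < k → reihe[s + j]? = some farbe)

-- the common reference answer: first matching full window, else -1
def refAns (reihe : List String) (farbe : String) (k : Nat) : Int :=
  match (List.range (reihe.length + 1 - k)).find? (win reihe farbe k) with
  | some s => (s : Int) + (k : Int) - 1
  | none => -1

theorem nebLoop_stop (reihe : List String) (farbe : String) (anzahl : Int)
    (fuel : Nat) (i z : Int) (h : ¬ (i < (reihe.length : Int) ∧ z < anzahl)) :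
    nebLoop reihe farbe anzahl fuel i z = (i, z) := by
  cases fuel with
  | zero => rfl
  | succ n => simp [nebLoop, h]

theorem refAns_none (reihe : List String) (farbe : String) (k : Nat)
    (hfirst : ∀ s, s + k ≤ reihe.length → win reihe farbe k s = false) :
    refAns reihe farbe k = -1 := by
  unfold refAns
  have hnone : (List.range (reihe.length + 1 - k)).find? (win reihe farbe k) = none := by
    rw [List.find?_eq_none]
    intro s hs
    simp only [List.mem_range] at hs
    simp [hfirst s (by omega)]
  rw [hnone]

theorem find?_range_first (p : Nat → Bool) (s : Nat) (hp : p s = true)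
    (hmin : ∀ t, t < s → p t = false) :
    ∀ m, s < m → (List.range m).find? p = some s := by
  intro m
  induction m with
  | zero => intro h; omega
  | succ m ih =>
    intro hs
    rw [List.range_succ, List.find?_append]
    rcases Nat.lt_or_ge s m with h | h
    · rw [ih h]; rfl
    · have hsm : s = m := by omega
      subst hsm
      have hnone : (List.range s).find? p = none := by
        rw [List.find?_eq_none]
        intro x hx
        simp [hmin x (List.mem_range.mp hx)]
      rw [hnone]
      simp [hp]

theorem all_window (reihe : List String) (farbe : String) (k s : Nat)
    (h : s + k ≤ reihe.length) :
    ((reihe.drop s).take k).all (fun x => x == farbe) = win reihe farbe k s := by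
  unfold win
  cases hall : ((reihe.drop s).take k).all (fun x => x == farbe) with
  | true =>
    symm
    rw [decide_eq_true_iff]
    intro j hj
    rw [List.all_eq_true] at hall
    have hjlen : s + j < reihe.length := by omega
    have hmem : reihe[s + j] ∈ (reihe.drop s).take k := by
      have hgt : ((reihe.drop s).take k)[j]'(by
          simp only [List.length_take, List.length_drop]; omega) = reihe[s + j]'hjlen := by
        rw [List.getElem_take, List.getElem_drop]
      rw [← hgt]
      exact List.getElem_mem _
    have hbeq := hall _ hmem
    simp only [beq_iff_eq] at hbeq
    simp [List.getElem?_eq_getElem hjlen, hbeq]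
  | false =>
    symm
    rw [decide_eq_false_iff_not]
    intro hcon
    rw [List.all_eq_false] at hall
    obtain ⟨x, hx, hxf⟩ := hall
    obtain ⟨j, hj, hxj⟩ := List.getElem_of_mem hx
    simp only [List.length_take, List.length_drop] at hj
    have hjk : j < k := lt_of_lt_of_le hj (min_le_left _ _)
    have hjlen : s + j < reihe.length := by omega
    have hx1 : x = reihe[s + j]'hjlen := by
      rw [← hxj, List.getElem_take, List.getElem_drop]
    have h2 := hcon j hjk
    rw [List.getElem?_eq_getElem hjlen] at h2
    apply hxf
    rw [hx1, beq_iff_eq]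
    exact Option.some.inj h2

-- proof-side model of the prefix list built by prefFold
def psum (farbe : String) (c : Int) : List String → List Int
  | [] => []
  | x :: xs =>
    (c + (if x == farbe then 1 else 0)) :: psum farbe (c + (if x == farbe then 1 else 0)) xs

theorem prefFold_go (farbe : String) :
    ∀ (l : List String) (acc : List Int) (c : Int),
      PySem.List.pyGetD acc (-1) 0 = c →
      l.foldl
        (fun pref x =>
          pref ++ [PySem.List.pyGetD pref (-1) 0 + (if x == farbe then 1 else 0)])
        acc = acc ++ psum farbe c l := by
  intro l
  induction l with
  | nil => intro acc c _; simp [psum]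
  | cons x xs ih =>
    intro acc c hc
    simp only [List.foldl_cons, psum]
    rw [hc, ih (acc ++ [c + (if x == farbe then 1 else 0)]) (c + (if x == farbe then 1 else 0))
      (PySem.List.pyGetD_neg_one_append_singleton acc _ 0)]
    simp

theorem prefFold_eq (farbe : String) (reihe : List String) :
    prefFold farbe reihe = 0 :: psum farbe 0 reihe := by
  unfold prefFold
  rw [prefFold_go farbe reihe [0] 0 (by decide)]
  rfl

theorem psum_getElem? (farbe : String) :
    ∀ (l : List String) (c : Int) (j : Nat), j < l.length →
      (psum farbe c l)[j]? =
        some (c + (((l.take (j + 1)).countP (fun x => x == farbe) : Nat) : Int)) := by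
  intro l
  induction l with
  | nil => intro c j hj; simp at hj
  | cons x xs ih =>
    intro c j hj
    cases j with
    | zero =>
      simp only [psum, List.getElem?_cons_zero, List.take_succ_cons, List.take_zero,
        List.countP_cons, List.countP_nil, Option.some.injEq]
      by_cases hx : (x == farbe) = true <;> simp [hx]
    | succ j =>
      simp only [psum, List.getElem?_cons_succ]
      rw [ih _ j (by simpa using hj)]
      simp only [List.take_succ_cons, List.countP_cons, Option.some.injEq]
      by_cases hx : (x == farbe) = true
      all_goals simp [hx]
      all_goals omega

theorem pref_getD (farbe : String) (reihe : List String) (j : Nat) (hj : j ≤ reihe.length) :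
    (prefFold farbe reihe).getD j 0 =
      (((reihe.take j).countP (fun x => x == farbe) : Nat) : Int) := by
  rw [prefFold_eq, List.getD_eq_getElem?_getD]
  cases j with
  | zero => simp
  | succ j =>
    rw [List.getElem?_cons_succ, psum_getElem? farbe reihe 0 j (by omega)]
    simp

-- a full window is all farbe iff its match count is k
theorem prefWindow (reihe : List String) (farbe : String) (k s : Nat)
    (h : s + k ≤ reihe.length) :
    ((((reihe.take (s + k)).countP (fun x => x == farbe) : Nat) : Int) -
        (((reihe.take s).countP (fun x => x == farbe) : Nat) : Int) == (k : Int)) =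
      win reihe farbe k s := by
  have hsplit : (reihe.take (s + k)).countP (fun x => x == farbe) =
      (reihe.take s).countP (fun x => x == farbe) +
        ((reihe.drop s).take k).countP (fun x => x == farbe) := by
    rw [List.take_add, List.countP_append]
  have hlen : ((reihe.drop s).take k).length = k := by
    simp only [List.length_take, List.length_drop]; omega
  rw [← all_window reihe farbe k s h]
  cases hall : ((reihe.drop s).take k).all (fun x => x == farbe) with
  | true =>
    rw [List.all_eq_true] at hall
    have hcnt : ((reihe.drop s).take k).countP (fun x => x == farbe) = k :=
      (List.countP_eq_length.mpr hall).trans hlen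
    rw [beq_iff_eq]
    simp [hsplit, hcnt]
  | false =>
    have hcnt : ((reihe.drop s).take k).countP (fun x => x == farbe) ≠ k := by
      intro hc
      have hall2 := List.countP_eq_length.mp (hc.trans hlen.symm)
      have ht : ((reihe.drop s).take k).all (fun x => x == farbe) = true :=
        List.all_eq_true.mpr hall2
      rw [hall] at ht
      exact Bool.false_ne_true ht
    rw [beq_eq_false_iff_ne]
    intro hcon
    apply hcnt
    omega

-- B-side: altFind over the mapped range is the first matching window
theorem altFind_map (reihe : List String) (farbe : String) (k : Nat)
    (l : List Nat) (hl : ∀ s ∈ l, s + k ≤ reihe.length) :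
    altFind (prefFold farbe reihe) (k : Int) (l.map (fun (s : Nat) => (s : Int))) =
      (match l.find? (win reihe farbe k) with
       | some s => (s : Int) + (k : Int) - 1
       | none => -1) := by
  induction l with
  | nil => rfl
  | cons s rest ih =>
    have hs : s + k ≤ reihe.length := hl s (by simp)
    have hcond : (PySem.List.pyGetD (prefFold farbe reihe) ((s : Int) + (k : Int)) 0 -
        PySem.List.pyGetD (prefFold farbe reihe) (s : Int) 0 == (k : Int)) =
        win reihe farbe k s := by
      rw [show ((s : Int) + (k : Int)) = ((s + k : Nat) : Int) by push_cast; ring,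
        PySem.List.pyGetD_natCast, PySem.List.pyGetD_natCast,
        pref_getD farbe reihe (s + k) (by omega), pref_getD farbe reihe s (by omega),
        prefWindow reihe farbe k s hs]
    simp only [List.map_cons, altFind]
    rw [hcond]
    cases hwin : win reihe farbe k s with
    | true => simp [hwin]
    | false =>
      rw [if_neg (by simp)]
      simp only [List.find?_cons, hwin]
      exact ih (fun t ht => hl t (by simp [ht]))

theorem alt_eq_ref (reihe : List String) (farbe : String) (k : Nat) (hk : 1 ≤ k) :
    nebeneinanderReihe_alt reihe farbe (k : Int) = refAns reihe farbe k := by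
  unfold nebeneinanderReihe_alt refAns
  rw [if_neg (by omega : ¬ ((k : Int) ≤ 0))]
  have hrange : PySem.List.pyRange 0 ((reihe.length : Int) - (k : Int) + 1) 1
      = (List.range (reihe.length + 1 - k)).map (fun (s : Nat) => (s : Int)) := by
    rw [PySem.List.pyRange_one]
    have h1 : (((reihe.length : Int) - (k : Int) + 1) - 0).toNat = reihe.length + 1 - k := by
      omega
    rw [h1]
    simp only [zero_add]
  rw [hrange, altFind_map reihe farbe k _ (by
    intro s hs
    simp only [List.mem_range] at hs
    omega)]

-- A-side main loop invariant: from state (ni, z) — a run of z farbe-stones ends just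
-- before ni, the stone before that run is not farbe, and no full window ends ≤ ni —
-- the loop's final answer is the first matching window overall.
theorem loopInv (reihe : List String) (farbe : String) (k : Nat) (hk : 1 ≤ k) :
    ∀ (fuel ni z : Nat),
      reihe.length ≤ ni + fuel →
      ni ≤ reihe.length →
      z ≤ ni →
      z < k →
      (∀ j, ni - z ≤ j → j < ni → reihe[j]? = some farbe) →
      (z < ni → reihe[ni - z - 1]? ≠ some farbe) →
      (∀ s, s + k ≤ ni → win reihe farbe k s = false) →
      (let p := nebLoop reihe farbe (k : Int) fuel (ni : Int) (z : Int)
       if (k : Int) ≤ p.2 then p.1 - 1 else -1) = refAns reihe farbe k := by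
  intro fuel
  induction fuel with
  | zero =>
    intro ni z hfuel hni hzni hzk hrun hbad hfirst
    simp only [nebLoop]
    rw [if_neg (by omega : ¬ ((k : Int) ≤ (z : Int)))]
    exact (refAns_none reihe farbe k (fun s hs => hfirst s (by omega))).symm
  | succ fuel ih =>
    intro ni z hfuel hni hzni hzk hrun hbad hfirst
    rcases Nat.lt_or_ge ni reihe.length with hlt | hge
    case inr =>
      rw [nebLoop_stop _ _ _ _ _ _ (by rintro ⟨h1, -⟩; omega)]
      simp only
      rw [if_neg (by omega : ¬ ((k : Int) ≤ (z : Int)))]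
      exact (refAns_none reihe farbe k (fun s hs => hfirst s (by omega))).symm
    case inl =>
      have hcond : (ni : Int) < (reihe.length : Int) ∧ (z : Int) < (k : Int) :=
        ⟨by omega, by omega⟩
      simp only [nebLoop, if_pos hcond]
      have hgete : PySem.List.pyGetD reihe (ni : Int) "" = reihe[ni]'hlt := by
        simp [List.getD, List.getElem?_eq_getElem hlt]
      by_cases hx : reihe[ni]'hlt = farbe
      · -- matching stone: counter becomes z + 1
        have hb : (PySem.List.pyGetD reihe (ni : Int) "" == farbe) = true := by
          rw [hgete, hx]
          exact beq_self_eq_true farbe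
        rw [if_pos hb]
        have hxopt : reihe[ni]? = some farbe := by
          rw [List.getElem?_eq_getElem hlt, hx]
        rcases Nat.lt_or_ge (z + 1) k with hz1 | hz1
        · -- still short: recurse via IH
          have hrun' : ∀ j, ni + 1 - (z + 1) ≤ j → j < ni + 1 → reihe[j]? = some farbe := by
            intro j hj1 hj2
            rcases Nat.lt_or_ge j ni with hj | hj
            · exact hrun j (by omega) hj
            · have hje : j = ni := by omega
              rw [hje]; exact hxopt
          have hbad' : z + 1 < ni + 1 → reihe[ni + 1 - (z + 1) - 1]? ≠ some farbe := by
            intro hlt'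
            rw [show ni + 1 - (z + 1) - 1 = ni - z - 1 by omega]
            exact hbad (by omega)
          have hfirst' : ∀ s, s + k ≤ ni + 1 → win reihe farbe k s = false := by
            intro s hs
            rcases Nat.lt_or_ge (s + k) (ni + 1) with hc | hc
            · exact hfirst s (by omega)
            · have hsk : s + k = ni + 1 := by omega
              have hzlt : z < ni := by omega
              unfold win
              rw [decide_eq_false_iff_not]
              intro hcon
              have hc2 := hcon (ni - z - 1 - s) (by omega)
              rw [show s + (ni - z - 1 - s) = ni - z - 1 by omega] at hc2
              exact hbad hzlt hc2
          have IH := ih (ni + 1) (z + 1) (by omega) (by omega) (by omega) hz1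
            hrun' hbad' hfirst'
          rw [show ((ni : Int) + 1) = ((ni + 1 : Nat) : Int) by push_cast; ring,
            show ((z : Int) + 1) = ((z + 1 : Nat) : Int) by push_cast; ring]
          simpa using IH
        · -- counter reaches k: the loop exits and this window is the first match
          have hzk1 : z + 1 = k := by omega
          rw [nebLoop_stop _ _ _ fuel _ _ (by rintro ⟨-, h2⟩; omega)]
          simp only
          rw [if_pos (by omega : (k : Int) ≤ (z : Int) + 1)]
          have hwin : win reihe farbe k (ni + 1 - k) = true := by
            unfold win
            rw [decide_eq_true_iff]
            intro j hj
            rcases Nat.lt_or_ge (ni + 1 - k + j) ni with hc | hc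
            · exact hrun _ (by omega) hc
            · rw [show ni + 1 - k + j = ni by omega]
              exact hxopt
          have hfind := find?_range_first (win reihe farbe k) (ni + 1 - k) hwin
            (fun t ht => hfirst t (by omega)) (reihe.length + 1 - k) (by omega)
          unfold refAns
          rw [hfind]
          show (ni : Int) + 1 - 1 = ((ni + 1 - k : Nat) : Int) + (k : Int) - 1
          omega
      · -- wrong stone: counter resets to 0
        have hb : ¬ (PySem.List.pyGetD reihe (ni : Int) "" == farbe) = true := by
          rw [hgete]
          simp [hx]
        rw [if_neg hb]
        have hxopt : reihe[ni]? ≠ some farbe := by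
          rw [List.getElem?_eq_getElem hlt]
          intro hcc
          exact hx (Option.some.inj hcc)
        have hbad' : (0 : Nat) < ni + 1 → reihe[ni + 1 - 0 - 1]? ≠ some farbe := by
          intro _
          rw [show ni + 1 - 0 - 1 = ni by omega]
          exact hxopt
        have hfirst' : ∀ s, s + k ≤ ni + 1 → win reihe farbe k s = false := by
          intro s hs
          rcases Nat.lt_or_ge (s + k) (ni + 1) with hc | hc
          · exact hfirst s (by omega)
          · have hsk : s + k = ni + 1 := by omega
            unfold win
            rw [decide_eq_false_iff_not]
            intro hcon
            have hc2 := hcon (ni - s) (by omega)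
            rw [show s + (ni - s) = ni by omega] at hc2
            exact hxopt hc2
        have IH := ih (ni + 1) 0 (by omega) (by omega) (by omega) (by omega)
          (by intro j hj1 hj2; omega) hbad' hfirst'
        rw [show ((ni : Int) + 1) = ((ni + 1 : Nat) : Int) by push_cast; ring,
          show (0 : Int) = ((0 : Nat) : Int) from rfl]
        simpa using IH

-- ===== VERDICT (by name: the statement is the Claim_ definition above) =====
theorem nebeneinanderReihe_spec : Claim_equal_nebeneinanderReihe := by
  intro reihe farbe anzahl _
  unfold Spec_nebeneinanderReihe
  by_cases hle : anzahl ≤ 0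
  · unfold nebeneinanderReihe nebeneinanderReihe_alt
    rw [nebLoop_stop _ _ _ _ _ _ (by rintro ⟨-, h2⟩; omega)]
    simp [hle]
  · obtain ⟨k, hk⟩ : ∃ k : Nat, anzahl = (k : Int) := ⟨anzahl.toNat, by omega⟩
    subst hk
    have hk1 : 1 ≤ k := by omega
    rw [alt_eq_ref reihe farbe k hk1]
    have hmain := loopInv reihe farbe k hk1 reihe.length 0 0 (by omega) (by omega)
      (by omega) (by omega) (by intro j h1 h2; omega) (by intro h; omega)
      (by intro s hs; omega)
    simpa [nebeneinanderReihe] using hmain
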